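-- pv_equiv track=rewrite | github.com/saardr/CheckPoint-ctf-2021-Solutions | moses/sol.py | morseEncoderWithNoSpace
-- ===== SOURCE A (Python) =====
-- enc_dict = {
-- 	'A':'.-', 'B':'-...',
-- 	'C':'-.-.', 'D':'-..', 'E':'.',
-- 	'F':'..-.', 'G':'--.', 'H':'....',
-- 	'I':'..', 'J':'.---', 'K':'-.-',
-- 	'L':'.-..', 'M':'--', 'N':'-.',
-- 	'O':'---', 'P':'.--.', 'Q':'--.-',
-- 	'R':'.-.', 'S':'...', 'T':'-',
-- 	'U':'..-', 'V':'...-', 'W':'.--',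
-- 	'X':'-..-', 'Y':'-.--', 'Z':'--..',
-- 	'1':'.----', '2':'..---', '3':'...--',
-- 	'4':'....-', '5':'.....', '6':'-....',
-- 	'7':'--...', '8':'---..', '9':'----.',
-- 	'0':'-----', ', ':'--..--', '.':'.-.-.-',
-- 	'?':'..--..', '/':'-..-.', '-':'-....-',
-- 	'(':'-.--.', ')':'-.--.-'
-- }
--
-- def morseEncoderWithNoSpace(text):
-- 	index_dict = {}
-- 	curr_len = 0
-- 	res_arr = []
-- 	for letter in text:
-- 		letter_morse = enc_dict[letter]
-- 		res_arr.append(letter_morse)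
-- 		index_dict[curr_len] = letter
-- 		curr_len += len(letter_morse)
-- 	res_morse = ''.join(res_arr)
-- 	return res_morse, index_dict
-- ===== SOURCE B (Python) =====
-- enc_dict = {
-- 	'A':'.-', 'B':'-...',
-- 	'C':'-.-.', 'D':'-..', 'E':'.',
-- 	'F':'..-.', 'G':'--.', 'H':'....',
-- 	'I':'..', 'J':'.---', 'K':'-.-',
-- 	'L':'.-..', 'M':'--', 'N':'-.',
-- 	'O':'---', 'P':'.--.', 'Q':'--.-',
-- 	'R':'.-.', 'S':'...', 'T':'-',
-- 	'U':'..-', 'V':'...-', 'W':'.--',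
-- 	'X':'-..-', 'Y':'-.--', 'Z':'--..',
-- 	'1':'.----', '2':'..---', '3':'...--',
-- 	'4':'....-', '5':'.....', '6':'-....',
-- 	'7':'--...', '8':'---..', '9':'----.',
-- 	'0':'-----', ', ':'--..--', '.':'.-.-.-',
-- 	'?':'..--..', '/':'-..-.', '-':'-....-',
-- 	'(':'-.--.', ')':'-.--.-'
-- }
--
-- def _enc(text):
-- 	# divide and conquer: encode each half independently, then shift the
-- 	# right half's offsets by the length of the left half's encoding
-- 	n = len(text)
-- 	if n == 0:
-- 		return '', {}
-- 	if n == 1: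
-- 		return enc_dict[text], {0: text}
-- 	mid = n // 2
-- 	lres, lidx = _enc(text[:mid])
-- 	rres, ridx = _enc(text[mid:])
-- 	off = len(lres)
-- 	for k, v in ridx.items():
-- 		lidx[k + off] = v
-- 	return lres + rres, lidx
--
-- def morseEncoderWithNoSpace(text):
-- 	return _enc(text)
-- ===== Notes on version B (the rewrite author's own statement) =====
-- stated objective: alternative
-- what changed: Replaces A's single left-to-right loop threading a running byte offset, an accumulator list and a dict by a divide-and-conquer recursion: each half of the text is encoded independently and the right half's offset dict is shifted by the left encoding's length at the merge.
import Mathlib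
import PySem

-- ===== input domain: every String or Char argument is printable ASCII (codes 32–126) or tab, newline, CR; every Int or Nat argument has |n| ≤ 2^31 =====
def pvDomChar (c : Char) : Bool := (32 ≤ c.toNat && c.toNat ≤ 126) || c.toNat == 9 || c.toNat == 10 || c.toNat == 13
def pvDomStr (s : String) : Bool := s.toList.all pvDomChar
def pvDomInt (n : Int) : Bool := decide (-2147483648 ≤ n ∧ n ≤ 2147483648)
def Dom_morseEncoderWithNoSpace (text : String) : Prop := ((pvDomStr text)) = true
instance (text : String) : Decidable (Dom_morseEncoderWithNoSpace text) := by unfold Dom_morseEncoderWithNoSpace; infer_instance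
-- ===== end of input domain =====

-- B replaces A's single accumulator loop by a divide-and-conquer recursion (encode halves, shift the right half's offsets at the merge); same return value proved equal wherever A returns (Pre_ excludes the KeyError inputs).

set_option maxRecDepth 40000


-- ===== PORT A =====
-- the module-level enc_dict
def encDict : PySem.Dict String String := PySem.Dict.mk [
  ("A", ".-"), ("B", "-..."),
  ("C", "-.-."), ("D", "-.."), ("E", "."),
  ("F", "..-."), ("G", "--."), ("H", "...."),
  ("I", ".."), ("J", ".---"), ("K", "-.-"),
  ("L", ".-.."), ("M", "--"), ("N", "-."),
  ("O", "---"), ("P", ".--."), ("Q", "--.-"),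
  ("R", ".-."), ("S", "..."), ("T", "-"),
  ("U", "..-"), ("V", "...-"), ("W", ".--"),
  ("X", "-..-"), ("Y", "-.--"), ("Z", "--.."),
  ("1", ".----"), ("2", "..---"), ("3", "...--"),
  ("4", "....-"), ("5", "....."), ("6", "-...."),
  ("7", "--..."), ("8", "---.."), ("9", "----."),
  ("0", "-----"), (", ", "--..--"), (".", ".-.-.-"),
  ("?", "..--.."), ("/", "-..-."), ("-", "-....-"),
  ("(", "-.--."), (")", "-.--.-")]

-- A's for-loop over text, threading (index_dict, curr_len, res_arr); none = KeyError
def aLoop : List Char → PySem.Dict Int String → Int → List String →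
    Option (PySem.Dict Int String × Int × List String)
  | [], indexDict, currLen, resArr => some (indexDict, currLen, resArr)
  | letter :: rest, indexDict, currLen, resArr =>
    match encDict.get? (String.singleton letter) with
    | none => none
    | some letterMorse =>
        aLoop rest (indexDict.insert currLen (String.singleton letter))
          (currLen + PySem.Str.len letterMorse) (resArr ++ [letterMorse])

def morseEncoderWithNoSpace (text : String) : String × (List (Int × String)) :=
  match aLoop text.toList PySem.Dict.empty 0 [] with
  | some (indexDict, _, resArr) => (PySem.Str.join "" resArr, indexDict.items)
  | none => ("", [])  -- KeyError: excluded by Pre_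

-- ===== PORT B =====
-- B's helper _enc: divide and conquer; none = KeyError
def bEnc (cs : List Char) : Option (String × PySem.Dict Int String) :=
  match h : cs with
  | [] => some ("", PySem.Dict.empty)
  | [c] =>
    match encDict.get? (String.singleton c) with
    | none => none
    | some m => some (m, PySem.Dict.empty.insert 0 (String.singleton c))
  | _ :: _ :: _ =>
    let mid := cs.length / 2
    match bEnc (cs.take mid), bEnc (cs.drop mid) with
    | some (lres, lidx), some (rres, ridx) =>
        let off := PySem.Str.len lres
        some (lres ++ rres,
          ridx.items.foldl (fun d p => d.insert (p.1 + off) p.2) lidx)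
    | _, _ => none
  termination_by cs.length
  decreasing_by
  · simp [h]; omega
  · simp [h]; omega

def morseEncoderWithNoSpace_alt (text : String) : String × (List (Int × String)) :=
  match bEnc text.toList with
  | some (res, idx) => (res, idx.items)
  | none => ("", [])  -- KeyError: excluded by Pre_

-- ===== PRECONDITION & SPEC =====
-- the characters occurring as single-character keys of enc_dict (its ", " key is never matched by one character)
def morseChars : List Char :=
  ['A','B','C','D','E','F','G','H','I','J','K','L','M','N','O','P','Q','R','S','T','U','V','W','X','Y','Z',
   '1','2','3','4','5','6','7','8','9','0','.','?','/','-','(',')']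

-- Pre_ excludes exactly the inputs containing a character absent from enc_dict, where A raises KeyError.
def Pre_morseEncoderWithNoSpace (text : String) : Prop :=
  (text.toList.all (fun c => morseChars.contains c)) = true
instance (text : String) : Decidable (Pre_morseEncoderWithNoSpace text) := by
  unfold Pre_morseEncoderWithNoSpace; infer_instance
def pvWitness_morseEncoderWithNoSpace : String := "SOS.1"

def Spec_morseEncoderWithNoSpace (text : String) (out : String × (List (Int × String))) : Prop := out = morseEncoderWithNoSpace_alt text
instance (text : String) (out : String × (List (Int × String))) : Decidable (Spec_morseEncoderWithNoSpace text out) := by unfold Spec_morseEncoderWithNoSpace; infer_instance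

-- ===== CLAIM (what is proved, stated in full; the proofs are below) =====
def Claim_equal_morseEncoderWithNoSpace : Prop := ∀ (text : String), Dom_morseEncoderWithNoSpace text → Pre_morseEncoderWithNoSpace text → Spec_morseEncoderWithNoSpace text (morseEncoderWithNoSpace text)

-- ===== LEMMAS AND PROOFS =====

-- proof-only: the encodings of the characters of cs, as a list (none = some char missing)
def pCodes : List Char → Option (List String)
  | [] => some []
  | letter :: rest =>
    match encDict.get? (String.singleton letter), pCodes rest with
    | some m, some ms => some (m :: ms)
    | _, _ => none

-- proof-only: the common spec of both index structures: (offset, letter) pairs advancing by code lengths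
def specPairs : Int → List Char → List String → List (Int × String)
  | _, [], _ => []
  | _, _ :: _, [] => []
  | cur, c :: cs, m :: ms => (cur, String.singleton c) :: specPairs (cur + PySem.Str.len m) cs ms

theorem enc_len_pos {s m : String} (h : encDict.get? s = some m) : 0 < PySem.Str.len m := by
  have hmem := PySem.Dict.mem_items_of_get?_eq_some encDict h
  have hall : ∀ p ∈ encDict.items, 0 < PySem.Str.len p.2 := by decide
  exact hall _ hmem

theorem pCodes_some_of_all_isSome (cs : List Char)
    (h : ∀ c ∈ cs, (encDict.get? (String.singleton c)).isSome = true) :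
    ∃ codes, pCodes cs = some codes := by
  induction cs with
  | nil => exact ⟨[], rfl⟩
  | cons c cs ih =>
    obtain ⟨m, hm⟩ := Option.isSome_iff_exists.mp (h c (by simp))
    obtain ⟨ms, hms⟩ := ih (fun x hx => h x (List.mem_cons_of_mem _ hx))
    exact ⟨m :: ms, by simp [pCodes, hm, hms]⟩

theorem pCodes_length (cs : List Char) (codes : List String)
    (h : pCodes cs = some codes) :
    cs.length = codes.length := by
  induction cs generalizing codes with
  | nil => rw [pCodes] at h; injection h with h; subst h; simp
  | cons c cs ih =>
    rw [pCodes] at h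
    rcases hm : encDict.get? (String.singleton c) with _ | m <;> rw [hm] at h
    · exact absurd h (by simp)
    rcases hms : pCodes cs with _ | ms <;> rw [hms] at h
    · exact absurd h (by simp)
    simp only [Option.some.injEq] at h
    subst h
    simp [ih ms hms]

theorem pCodes_append (a b : List Char) (codes : List String)
    (h : pCodes (a ++ b) = some codes) :
    ∃ ca cb, pCodes a = some ca ∧ pCodes b = some cb ∧ codes = ca ++ cb := by
  induction a generalizing codes with
  | nil => exact ⟨[], codes, rfl, h, rfl⟩
  | cons c cs ih =>
    rw [List.cons_append, pCodes] at h
    rcases hm : encDict.get? (String.singleton c) with _ | m <;> rw [hm] at h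
    · exact absurd h (by simp)
    rcases hms : pCodes (cs ++ b) with _ | ms <;> rw [hms] at h
    · exact absurd h (by simp)
    simp only [Option.some.injEq] at h
    subst h
    obtain ⟨ca, cb, h1, h2, h3⟩ := ih ms hms
    exact ⟨m :: ca, cb, by simp [pCodes, hm, h1], h2, by simp [h3]⟩

theorem codes_pos (cs : List Char) (codes : List String)
    (h : pCodes cs = some codes) :
    ∀ m ∈ codes, 0 < PySem.Str.len m := by
  induction cs generalizing codes with
  | nil => rw [pCodes] at h; injection h with h; subst h; simp
  | cons c cs ih =>
    rw [pCodes] at h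
    rcases hm : encDict.get? (String.singleton c) with _ | m <;> rw [hm] at h
    · exact absurd h (by simp)
    rcases hms : pCodes cs with _ | ms <;> rw [hms] at h
    · exact absurd h (by simp)
    simp only [Option.some.injEq] at h
    subst h
    intro x hx
    rcases List.mem_cons.mp hx with rfl | hx
    · exact enc_len_pos hm
    · exact ih ms hms x hx

theorem aLoop_spec (cs : List Char) (codes : List String)
    (hc : pCodes cs = some codes) :
    ∀ (d : PySem.Dict Int String) (cur : Int) (arr : List String),
      (∀ k ∈ d.keys, k < cur) →
      ∃ D cur', aLoop cs d cur arr = some (D, cur', arr ++ codes) ∧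
        D.items = d.items ++ specPairs cur cs codes := by
  induction cs generalizing codes with
  | nil =>
    rw [pCodes] at hc
    injection hc with hc
    subst hc
    intro d cur arr _
    exact ⟨d, cur, by simp [aLoop], by simp [specPairs]⟩
  | cons c cs ih =>
    rw [pCodes] at hc
    rcases hm : encDict.get? (String.singleton c) with _ | m <;> rw [hm] at hc
    · exact absurd hc (by simp)
    rcases hms : pCodes cs with _ | ms <;> rw [hms] at hc
    · exact absurd hc (by simp)
    simp only [Option.some.injEq] at hc
    subst hc
    intro d cur arr hk
    have hnc : d.contains cur = false := by
      rw [PySem.Dict.contains_eq_decide_mem_keys]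
      simp only [decide_eq_false_iff_not]
      intro hmem
      exact absurd (hk cur hmem) (lt_irrefl cur)
    have hk' : ∀ k ∈ (d.insert cur (String.singleton c)).keys, k < cur + PySem.Str.len m := by
      rw [PySem.Dict.keys_insert_of_not_contains d _ hnc]
      intro k hkm
      have hpos := enc_len_pos hm
      rcases List.mem_append.mp hkm with h1 | h1
      · exact lt_trans (hk k h1) (by omega)
      · simp only [List.mem_singleton] at h1; omega
    obtain ⟨D, cur', hrun, hitems⟩ :=
      ih ms hms (d.insert cur (String.singleton c)) (cur + PySem.Str.len m) (arr ++ [m]) hk'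
    refine ⟨D, cur', ?_, ?_⟩
    · simp only [aLoop, hm, hrun, List.append_assoc, List.singleton_append]
    · rw [hitems, PySem.Dict.items_insert_of_not_contains d _ hnc]
      simp [specPairs]

-- bounds and distinctness of the offsets in specPairs
theorem specPairs_keys (cs : List Char) (codes : List String)
    (hpos : ∀ m ∈ codes, 0 < PySem.Str.len m) (cur : Int) :
    (∀ k ∈ (specPairs cur cs codes).map Prod.fst, cur ≤ k) ∧
      ((specPairs cur cs codes).map Prod.fst).Nodup := by
  induction cs generalizing codes cur with
  | nil => simp [specPairs]
  | cons c cs ih =>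
    cases codes with
    | nil => simp [specPairs]
    | cons m ms =>
      have hm : 0 < PySem.Str.len m := hpos m (by simp)
      obtain ⟨hle, hnd⟩ := ih ms (fun x hx => hpos x (List.mem_cons_of_mem _ hx)) (cur + PySem.Str.len m)
      constructor
      · intro k hk
        simp only [specPairs, List.map_cons, List.mem_cons] at hk
        rcases hk with rfl | hk
        · exact le_refl _
        · exact le_trans (by omega) (hle k hk)
      · simp only [specPairs, List.map_cons, List.nodup_cons]
        refine ⟨fun hmem => ?_, hnd⟩
        have := hle cur hmem
        omega

-- the sum of the code lengths
def sumLen (codes : List String) : Int := (codes.map PySem.Str.len).sum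

theorem sumLen_nonneg (codes : List String)
    (hpos : ∀ m ∈ codes, 0 < PySem.Str.len m) : 0 ≤ sumLen codes := by
  induction codes with
  | nil => simp [sumLen]
  | cons m ms ih =>
    have := hpos m (by simp)
    have := ih (fun x hx => hpos x (List.mem_cons_of_mem _ hx))
    simp only [sumLen, List.map_cons, List.sum_cons] at *
    omega

theorem specPairs_keys_ub (cs : List Char) (codes : List String)
    (hpos : ∀ m ∈ codes, 0 < PySem.Str.len m) (cur : Int) :
    ∀ k ∈ (specPairs cur cs codes).map Prod.fst, k < cur + sumLen codes := by
  induction cs generalizing codes cur with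
  | nil => simp [specPairs]
  | cons c cs ih =>
    cases codes with
    | nil => simp [specPairs]
    | cons m ms =>
      have hm : 0 < PySem.Str.len m := hpos m (by simp)
      have hms : ∀ x ∈ ms, 0 < PySem.Str.len x := fun x hx => hpos x (List.mem_cons_of_mem _ hx)
      have hnn := sumLen_nonneg ms hms
      intro k hk
      simp only [specPairs, List.map_cons, List.mem_cons] at hk
      rcases hk with rfl | hk
      · simp only [sumLen, List.map_cons, List.sum_cons] at hnn ⊢; omega
      · have := ih ms hms (cur + PySem.Str.len m) k hk
        simp only [sumLen, List.map_cons, List.sum_cons] at *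
        omega

theorem specPairs_shift (cs : List Char) (codes : List String) (cur off : Int) :
    specPairs (cur + off) cs codes = (specPairs cur cs codes).map (fun p => (p.1 + off, p.2)) := by
  induction cs generalizing codes cur with
  | nil => simp [specPairs]
  | cons c cs ih =>
    cases codes with
    | nil => simp [specPairs]
    | cons m ms =>
      simp only [specPairs, List.map_cons]
      rw [show cur + off + PySem.Str.len m = cur + PySem.Str.len m + off by ring, ih]

theorem specPairs_append (a b : List Char) (ca cb : List String) (cur : Int)
    (hlen : a.length = ca.length) :
    specPairs cur (a ++ b) (ca ++ cb) =
      specPairs cur a ca ++ specPairs (cur + sumLen ca) b cb := by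
  induction a generalizing ca cur with
  | nil =>
    have : ca = [] := by cases ca <;> simp_all
    subst this
    simp [specPairs, sumLen]
  | cons c cs ih =>
    cases ca with
    | nil => simp at hlen
    | cons m ms =>
      simp only [List.cons_append, specPairs, sumLen, List.map_cons, List.sum_cons]
      rw [ih ms (cur + PySem.Str.len m) (by simpa using hlen)]
      simp only [sumLen]
      congr 2
      ring

theorem join_nil_flatten (a : List (List Char)) : PySem.Chars.join [] a = a.flatten := by
  induction a with
  | nil => rfl
  | cons x xs ih =>
    cases xs with
    | nil => simp [PySem.Chars.join, List.intercalate]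
    | cons y ys =>
      simp only [PySem.Chars.join, List.intercalate] at *
      simp_all [List.intersperse]

theorem join_append (a b : List String) :
    PySem.Str.join "" (a ++ b) = PySem.Str.join "" a ++ PySem.Str.join "" b := by
  simp [PySem.Str.join, join_nil_flatten]

theorem len_join (codes : List String) :
    PySem.Str.len (PySem.Str.join "" codes) = sumLen codes := by
  induction codes with
  | nil => rfl
  | cons m ms ih =>
    rw [show (m :: ms) = [m] ++ ms from rfl, join_append, PySem.Str.len_append]
    simp only [sumLen, List.map_cons]
    rw [show PySem.Str.join "" [m] = m by simp [PySem.Str.join], ih]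
    rfl

-- the heart of the proof: B's divide-and-conquer also produces (join of the codes, specPairs)
theorem bEnc_spec : ∀ (n : Nat) (cs : List Char) (codes : List String), cs.length ≤ n →
    pCodes cs = some codes →
    ∃ d, bEnc cs = some (PySem.Str.join "" codes, d) ∧ d.items = specPairs 0 cs codes := by
  intro n
  induction n with
  | zero =>
    intro cs codes hle hc
    have : cs = [] := List.eq_nil_of_length_eq_zero (Nat.le_zero.mp hle)
    subst this
    rw [pCodes] at hc
    injection hc with hc
    subst hc
    exact ⟨PySem.Dict.empty, by rw [bEnc]; rfl, by simp [specPairs, PySem.Dict.empty]⟩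
  | succ n ih =>
    intro cs codes hle hc
    match cs with
    | [] =>
      rw [pCodes] at hc
      injection hc with hc
      subst hc
      exact ⟨PySem.Dict.empty, by rw [bEnc]; rfl, by simp [specPairs, PySem.Dict.empty]⟩
    | [c] =>
      rw [pCodes] at hc
      rcases hm : encDict.get? (String.singleton c) with _ | m <;> rw [hm] at hc
      · exact absurd hc (by simp)
      rw [pCodes] at hc
      simp only [Option.some.injEq] at hc
      subst hc
      refine ⟨PySem.Dict.empty.insert 0 (String.singleton c), ?_, ?_⟩
      · rw [bEnc, hm]
        simp [PySem.Str.join]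
      · rw [PySem.Dict.items_insert_of_not_contains _ _ (PySem.Dict.contains_empty _)]
        simp [specPairs, PySem.Dict.empty]
    | c1 :: c2 :: rest =>
      set cs := c1 :: c2 :: rest with hcs
      have hlen2 : 2 ≤ cs.length := by simp [hcs]
      set mid := cs.length / 2 with hmid
      have hmid1 : 1 ≤ mid := by omega
      have hmidlt : mid < cs.length := by omega
      have hsplit : cs = cs.take mid ++ cs.drop mid := (List.take_append_drop mid cs).symm
      rw [hsplit] at hc
      obtain ⟨ca, cb, hca, hcb, hcodes⟩ := pCodes_append _ _ _ hc
      have hlt : (cs.take mid).length ≤ n := by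
        rw [List.length_take]
        omega
      have hrt : (cs.drop mid).length ≤ n := by
        rw [List.length_drop]
        omega
      obtain ⟨dl, hdl, hdli⟩ := ih (cs.take mid) ca hlt hca
      obtain ⟨dr, hdr, hdri⟩ := ih (cs.drop mid) cb hrt hcb
      have hposa : ∀ m ∈ ca, 0 < PySem.Str.len m := codes_pos _ _ hca
      have hposb : ∀ m ∈ cb, 0 < PySem.Str.len m := codes_pos _ _ hcb
      have hlena : (cs.take mid).length = ca.length := pCodes_length _ _ hca
      -- the merge fold appends the shifted right items to the left items
      have hoff : PySem.Str.len (PySem.Str.join "" ca) = sumLen ca := len_join ca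
      have hlkeys := specPairs_keys_ub (cs.take mid) ca hposa 0
      have hrkeys := specPairs_keys (cs.drop mid) cb hposb 0
      have hfresh : ∀ p ∈ dr.items, dl.contains (p.1 + sumLen ca) = false := by
        intro p hp
        rw [PySem.Dict.contains_eq_decide_mem_keys]
        simp only [decide_eq_false_iff_not]
        intro hmem
        have hmem' : p.1 + sumLen ca ∈ dl.items.map Prod.fst := hmem
        rw [hdli] at hmem'
        have h1 := hlkeys _ hmem'
        have h2 : (0 : Int) ≤ p.1 := by
          have : p.1 ∈ dr.items.map Prod.fst := List.mem_map_of_mem hp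
          rw [hdri] at this
          exact hrkeys.1 _ this
        omega
      have hndshift : (dr.items.map (fun p => p.1 + sumLen ca)).Nodup := by
        have : (dr.items.map (fun p => p.1 + sumLen ca)) =
            (dr.items.map Prod.fst).map (fun k => k + sumLen ca) := by
          simp
        rw [this]
        refine List.Nodup.map (fun x y h => by omega) ?_
        rw [hdri]
        exact hrkeys.2
      have hfold := PySem.Dict.items_foldl_insert_fresh dr.items
        (fun p => p.1 + sumLen ca) Prod.snd dl hfresh hndshift
      refine ⟨dr.items.foldl (fun d p => d.insert (p.1 + PySem.Str.len (PySem.Str.join "" ca)) p.2) dl, ?_, ?_⟩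
      · rw [bEnc]
        simp only
        rw [← hmid, hdl, hdr, hcodes, join_append]
      · rw [hoff, hfold, hdli, hdri, hcodes]
        conv_rhs => rw [hsplit]
        rw [specPairs_append _ _ _ _ 0 hlena, zero_add,
          ← zero_add (sumLen ca), specPairs_shift _ _ 0 (sumLen ca)]
        simp

-- ===== VERDICT (by name: the statement is the Claim_ definition above) =====
theorem morseEncoderWithNoSpace_spec : Claim_equal_morseEncoderWithNoSpace := by
  intro text _ hpre
  unfold Spec_morseEncoderWithNoSpace
  have hdec : (morseChars.all (fun c => (encDict.get? (String.singleton c)).isSome)) = true := by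
    decide
  have hpre2 : ∀ c ∈ text.toList, (encDict.get? (String.singleton c)).isSome = true := by
    intro c hcmem
    exact List.all_eq_true.mp hdec c
      (List.contains_iff_mem.mp (List.all_eq_true.mp hpre c hcmem))
  obtain ⟨codes, hc⟩ := pCodes_some_of_all_isSome text.toList hpre2
  obtain ⟨D, cur', hrun, hitems⟩ :=
    aLoop_spec text.toList codes hc PySem.Dict.empty 0 [] (by simp)
  obtain ⟨d, hb, hdi⟩ := bEnc_spec text.toList.length text.toList codes (le_refl _) hc
  unfold morseEncoderWithNoSpace morseEncoderWithNoSpace_alt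
  rw [hrun, hb]
  simp only [List.nil_append]
  rw [hitems, hdi]
  simp [PySem.Dict.empty]
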